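-- pv_equiv track=rewrite | github.com/robertomorel/map-reduce-python | 12_map_reduce/top_5_stripes.py | mapper2
-- ===== SOURCE A (Python) =====
-- def mapper2(key, value):
--   items = value
--
--   items.sort()
--
--   for i in range(len(items)):
--     item1 = items[i]
--
--     m = {}
--     for j in range (i + 1, len(items)):
--       item2 = items[j]
--       if item2 not in m:
--         m[item2] = 0
--         m[item2] = m[item2] + 1
--     yield item1,m
-- ===== SOURCE B (Python) =====
-- def mapper2(key, value):
--   value.sort()
--   m = {}
--   snaps = []
--   for x in reversed(value):
--     snaps.append((x, m))
--     m = {x: 1, **m}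
--   for pair in reversed(snaps):
--     yield pair
-- ===== Notes on version B (the rewrite author's own statement) =====
-- stated objective: alternative
-- what changed: A rescans every suffix items[i+1:] to rebuild each stripe dict from scratch; B sorts once, then does a single backward pass maintaining one running dict of the distinct suffix items, snapshotting it at each position and yielding the snapshots in forward order.
import Mathlib
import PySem

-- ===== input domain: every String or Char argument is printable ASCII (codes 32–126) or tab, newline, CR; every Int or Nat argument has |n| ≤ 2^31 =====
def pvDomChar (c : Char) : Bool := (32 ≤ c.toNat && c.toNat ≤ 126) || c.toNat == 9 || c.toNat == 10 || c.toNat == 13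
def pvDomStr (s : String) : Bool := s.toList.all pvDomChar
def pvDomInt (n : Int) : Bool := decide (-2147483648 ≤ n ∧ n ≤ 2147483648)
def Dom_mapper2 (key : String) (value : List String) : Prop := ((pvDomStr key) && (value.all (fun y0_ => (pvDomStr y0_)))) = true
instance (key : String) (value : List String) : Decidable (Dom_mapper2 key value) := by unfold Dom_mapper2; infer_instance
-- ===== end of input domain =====

-- B replaces A's O(n^2) rescan of every suffix by one backward pass keeping a running dict of
-- the distinct suffix items (alternative decomposition). Both A and B sort `value` in place
-- (the Python list argument is mutated identically); the equivalence proved here is about the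
-- returned (yielded) sequence of (item, dict) pairs.

-- ===== PORT A =====
def mapper2 (key : String) (value : List String) : List (String × (List (String × Int))) :=
  let items := PySem.List.sorted value (fun s => s)              -- items.sort()
  (PySem.List.pyRange 0 (PySem.List.len items) 1).foldl
    (fun acc i =>
      let item1 := PySem.List.pyGetD items i ""                  -- item1 = items[i] (i in range)
      let m := (PySem.List.pyRange (i + 1) (PySem.List.len items) 1).foldl
        (fun m j =>
          let item2 := PySem.List.pyGetD items j ""              -- item2 = items[j] (j in range)
          if m.contains item2 = false then                       -- if item2 not in m:
            let m := m.insert item2 0                            --   m[item2] = 0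
            m.modify item2 0 (· + 1)                             --   m[item2] = m[item2] + 1
          else m)
        PySem.Dict.empty
      acc ++ [(item1, m.items)])                                 -- yield item1, m
    []

-- ===== PORT B =====
def mapper2_alt (key : String) (value : List String) : List (String × (List (String × Int))) :=
  let items := PySem.List.sorted value (fun s => s)              -- value.sort()
  let st := items.reverse.foldl                                  -- for x in reversed(value):
    (fun (st : PySem.Dict String Int × List (String × List (String × Int))) x =>
      let snaps := st.2 ++ [(x, st.1.items)]                     --   snaps.append((x, m))
      let m := st.1.items.foldl (fun d p => d.insert p.1 p.2)
        (PySem.Dict.empty.insert x 1)                            --   m = {x: 1, **m}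
      (m, snaps))
    (PySem.Dict.empty, [])
  st.2.reverse                                                   -- yield from reversed(snaps)

-- ===== PRECONDITION & SPEC =====
def Spec_mapper2 (key : String) (value : List String) (out : List (String × (List (String × Int)))) : Prop := out = mapper2_alt key value
instance (key : String) (value : List String) (out : List (String × (List (String × Int)))) : Decidable (Spec_mapper2 key value out) := by unfold Spec_mapper2; infer_instance

-- ===== CLAIM (what is proved, stated in full; the proofs are below) =====
def Claim_equal_mapper2 : Prop := ∀ (key : String) (value : List String), Dom_mapper2 key value → Spec_mapper2 key value (mapper2 key value)

-- ===== LEMMAS AND PROOFS =====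

-- A's inner-loop step on the running dict.
def pvStep (m : PySem.Dict String Int) (y : String) : PySem.Dict String Int :=
  if m.contains y = false then (m.insert y 0).modify y 0 (· + 1) else m

lemma pvStep_eq (m : PySem.Dict String Int) (y : String) :
    pvStep m y = if m.contains y = false then m.insert y 1 else m := by
  unfold pvStep
  simp [PySem.Dict.modify, PySem.Dict.getD_insert_self, PySem.Dict.insert_insert_self]

-- keys of A's inner dict: first occurrences in t of elements not in s, in order
def pvFresh : List String → List String → List String
  | [], _ => []
  | y :: ys, s => if y ∈ s then pvFresh ys s else y :: pvFresh ys (y :: s)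

lemma pvFresh_congr (t : List String) (s s' : List String)
    (h : ∀ z ∈ t, (z ∈ s ↔ z ∈ s')) : pvFresh t s = pvFresh t s' := by
  induction t generalizing s s' with
  | nil => rfl
  | cons y ys ih =>
    simp only [pvFresh]
    have hy := h y (by simp)
    by_cases hys : y ∈ s
    · rw [if_pos hys, if_pos (hy.mp hys)]
      exact ih s s' fun z hz => h z (by simp [hz])
    · rw [if_neg hys, if_neg (fun c => hys (hy.mpr c))]
      refine congrArg _ (ih _ _ fun z hz => ?_)
      simp only [List.mem_cons]
      exact or_congr Iff.rfl (h z (by simp [hz]))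

lemma pvFresh_mem {t s : List String} {k : String} (h : k ∈ pvFresh t s) :
    k ∈ t ∧ k ∉ s := by
  induction t generalizing s with
  | nil => simp [pvFresh] at h
  | cons y ys ih =>
    simp only [pvFresh] at h
    by_cases hys : y ∈ s
    · rw [if_pos hys] at h
      obtain ⟨h1, h2⟩ := ih h
      exact ⟨by simp [h1], h2⟩
    · rw [if_neg hys] at h
      rcases List.mem_cons.mp h with rfl | h
      · exact ⟨by simp, hys⟩
      · obtain ⟨h1, h2⟩ := ih h
        exact ⟨by simp [h1], fun c => h2 (by simp [c])⟩

lemma pvFresh_nodup (t : List String) (s : List String) : (pvFresh t s).Nodup := by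
  induction t generalizing s with
  | nil => simp [pvFresh]
  | cons y ys ih =>
    simp only [pvFresh]
    split
    · exact ih s
    · exact List.nodup_cons.mpr ⟨fun c => (pvFresh_mem c).2 (by simp), ih _⟩

lemma pvFoldl_step_items (t : List String) (d : PySem.Dict String Int) :
    (t.foldl pvStep d).items = d.items ++ (pvFresh t d.keys).map (fun k => (k, (1 : Int))) := by
  induction t generalizing d with
  | nil => simp [pvFresh]
  | cons y ys ih =>
    simp only [List.foldl_cons, pvStep_eq, pvFresh]
    by_cases hc : d.contains y = true
    · rw [if_neg (by simp [hc]), if_pos ((PySem.Dict.contains_iff_mem_keys d y).mp hc)]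
      exact ih d
    · have hc' : d.contains y = false := by revert hc; cases h : d.contains y <;> simp
      have hkeys : y ∉ d.keys := fun c => by
        simp [(PySem.Dict.contains_iff_mem_keys d y).mpr c] at hc'
      rw [if_pos hc', if_neg hkeys, ih]
      rw [PySem.Dict.items_insert_of_not_contains d 1 hc',
          PySem.Dict.keys_insert_of_not_contains d 1 hc']
      rw [pvFresh_congr ys (d.keys ++ [y]) (y :: d.keys) (by intro z _; simp; tauto)]
      simp

-- A's inner dict for the suffix t
def pvD (t : List String) : PySem.Dict String Int := t.foldl pvStep PySem.Dict.empty

lemma pvD_items (t : List String) :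
    (pvD t).items = (pvFresh t []).map (fun k => (k, (1 : Int))) := by
  have h := pvFoldl_step_items t PySem.Dict.empty
  simpa [pvD, PySem.Dict.empty] using h

-- B's running dict for the suffix t
def pvM : List String → PySem.Dict String Int
  | [] => PySem.Dict.empty
  | x :: xs => (pvM xs).items.foldl (fun d p => d.insert p.1 p.2) (PySem.Dict.empty.insert x 1)

lemma pvEmpty_insert_items (x : String) (v : Int) :
    (PySem.Dict.empty.insert x v).items = [(x, v)] := by
  rw [PySem.Dict.items_insert_of_not_contains _ v (by simp)]
  simp [PySem.Dict.empty]

lemma pvEmpty_insert_contains (x k : String) (v : Int) (h : k ≠ x) :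
    (PySem.Dict.empty.insert x v).contains k = false := by
  simp [PySem.Dict.contains_insert, h]

lemma pvFoldl_pairs (ps : List (String × Int)) (x : String)
    (hne : ∀ p ∈ ps, p.1 ≠ x) (hnd : (ps.map Prod.fst).Nodup) :
    (ps.foldl (fun d p => d.insert p.1 p.2) (PySem.Dict.empty.insert x 1)).items
      = (x, (1 : Int)) :: ps := by
  rw [PySem.Dict.items_foldl_insert_fresh ps Prod.fst Prod.snd _
    (fun a ha => pvEmpty_insert_contains x a.1 1 (hne a ha)) hnd]
  rw [pvEmpty_insert_items]
  simp

lemma pvM_eq_pvD (l : List String) (hs : l.Pairwise (· ≤ ·)) : pvM l = pvD l := by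
  induction l with
  | nil => rfl
  | cons x xs ih =>
    have hrel : ∀ y ∈ xs, x ≤ y := (List.pairwise_cons.mp hs).1
    have hxs : xs.Pairwise (· ≤ ·) := (List.pairwise_cons.mp hs).2
    apply PySem.Dict.ext
    simp only [pvM, ih hxs, pvD_items]
    by_cases hmem : x ∈ xs
    · -- x is the head of xs (xs is sorted and all its elements are ≥ x)
      obtain ⟨y, t, rfl⟩ : ∃ y t, xs = y :: t := by
        cases xs with
        | nil => simp at hmem
        | cons y t => exact ⟨y, t, rfl⟩
      have hyx : y = x := by
        rcases List.mem_cons.mp hmem with h | h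
        · exact h.symm
        · exact le_antisymm ((List.pairwise_cons.mp hxs).1 x h) (hrel y (by simp))
      subst hyx
      have hfa : pvFresh (y :: t) [] = y :: pvFresh t [y] := by simp [pvFresh]
      have hfb : pvFresh (y :: y :: t) [] = y :: pvFresh t [y] := by simp [pvFresh]
      rw [hfa, hfb]
      simp only [List.map_cons, List.foldl_cons]
      have hself : ((PySem.Dict.empty.insert y 1).insert
          ((y, (1:Int)).1) ((y, (1:Int)).2)) = PySem.Dict.empty.insert y 1 := by
        simpa using PySem.Dict.insert_insert_self PySem.Dict.empty y 1 1
      rw [hself]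
      rw [pvFoldl_pairs _ y
        (by intro p hp
            obtain ⟨k, hk, rfl⟩ := List.mem_map.mp hp
            have := (pvFresh_mem hk).2
            simpa using this)
        (by
          rw [List.map_map]
          have : (Prod.fst ∘ fun k : String => (k, (1:Int))) = id := rfl
          rw [this, List.map_id]
          exact pvFresh_nodup t [y])]
    · have hfa : pvFresh (x :: xs) [] = x :: pvFresh xs [x] := by simp [pvFresh]
      have hcg : pvFresh xs [x] = pvFresh xs [] :=
        pvFresh_congr xs [x] [] (by
          intro z hz
          simp only [List.mem_singleton, List.not_mem_nil, iff_false]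
          exact fun c => hmem (c ▸ hz))
      rw [hfa, hcg]
      simp only [List.map_cons]
      rw [pvFoldl_pairs _ x
        (by intro p hp
            obtain ⟨k, hk, rfl⟩ := List.mem_map.mp hp
            intro c
            exact hmem (c ▸ (pvFresh_mem hk).1))
        (by
          rw [List.map_map]
          have : (Prod.fst ∘ fun k : String => (k, (1:Int))) = id := rfl
          rw [this, List.map_id]
          exact pvFresh_nodup xs [])]

-- recursive forms of the two outputs
def pvG : List String → List (String × (List (String × Int)))
  | [] => []
  | x :: xs => (x, (pvD xs).items) :: pvG xs

def pvH : List String → List (String × (List (String × Int)))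
  | [] => []
  | x :: xs => (x, (pvM xs).items) :: pvH xs

-- B's snapshot list for the suffix
def pvS : List String → List (String × (List (String × Int)))
  | [] => []
  | x :: xs => pvS xs ++ [(x, (pvM xs).items)]

lemma pvInner_eq (l : List String) (i : Int) (hi : 0 ≤ i) :
    (PySem.List.pyRange (i + 1) ((l.length : Int)) 1).foldl
      (fun m j =>
        if m.contains (PySem.List.pyGetD l j "") = false then
          ((m.insert (PySem.List.pyGetD l j "") 0).modify (PySem.List.pyGetD l j "") 0 (· + 1))
        else m)
      PySem.Dict.empty = pvD (l.drop (i + 1).toNat) := by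
  have hf : (fun (m : PySem.Dict String Int) (j : Int) =>
      if m.contains (PySem.List.pyGetD l j "") = false then
        ((m.insert (PySem.List.pyGetD l j "") 0).modify (PySem.List.pyGetD l j "") 0 (· + 1))
      else m) = fun m j => pvStep m (PySem.List.pyGetD l j "") := rfl
  rw [hf, ← PySem.List.len_eq,
    PySem.List.foldl_pyRange_pyGetD l "" pvStep PySem.Dict.empty (by omega)]
  rfl

lemma pvMapIdx_eq (l : List String) :
    (List.range l.length).map (fun k => (l.getD k "", (pvD (l.drop (k + 1))).items)) = pvG l := by
  induction l with
  | nil => simp [pvG]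
  | cons x xs ih =>
    simp only [List.length_cons, List.range_succ_eq_map, List.map_cons, List.map_map]
    refine congrArg₂ _ rfl ?_
    rw [← ih]
    exact List.map_congr_left fun k _ => by simp

lemma pvA_eq_pvG (l : List String) :
    (PySem.List.pyRange 0 (PySem.List.len l) 1).foldl
      (fun acc i =>
        acc ++ [(PySem.List.pyGetD l i "",
          ((PySem.List.pyRange (i + 1) (PySem.List.len l) 1).foldl
            (fun m j =>
              if m.contains (PySem.List.pyGetD l j "") = false then
                ((m.insert (PySem.List.pyGetD l j "") 0).modify (PySem.List.pyGetD l j "") 0 (· + 1))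
              else m)
            PySem.Dict.empty).items)])
      [] = pvG l := by
  rw [PySem.List.len_eq, PySem.List.pyRange_zero_nat, List.foldl_map,
    PySem.List.foldl_append_singleton_eq_map]
  rw [← pvMapIdx_eq]
  refine List.map_congr_left fun k _ => ?_
  rw [pvInner_eq l (k : Int) (by positivity)]
  have h1 : ((k : Int) + 1).toNat = k + 1 := by omega
  rw [h1, PySem.List.pyGetD_natCast]

lemma pvFoldr_eq (l : List String) :
    (l.foldr
      (fun x (st : PySem.Dict String Int × List (String × List (String × Int))) =>
        (st.1.items.foldl (fun d p => d.insert p.1 p.2) (PySem.Dict.empty.insert x 1),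
         st.2 ++ [(x, st.1.items)]))
      (PySem.Dict.empty, [])) = (pvM l, pvS l) := by
  induction l with
  | nil => rfl
  | cons x xs ih => simp only [List.foldr_cons, ih, pvM, pvS]

lemma pvS_reverse (l : List String) : (pvS l).reverse = pvH l := by
  induction l with
  | nil => rfl
  | cons x xs ih => simp [pvS, pvH, ih]

lemma pvB_eq_pvH (l : List String) :
    ((l.reverse.foldl
      (fun (st : PySem.Dict String Int × List (String × List (String × Int))) x =>
        (st.1.items.foldl (fun d p => d.insert p.1 p.2) (PySem.Dict.empty.insert x 1),
         st.2 ++ [(x, st.1.items)]))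
      (PySem.Dict.empty, [])).2).reverse = pvH l := by
  rw [List.foldl_reverse, pvFoldr_eq, pvS_reverse]

lemma pvG_eq_pvH (l : List String) (hs : l.Pairwise (· ≤ ·)) : pvG l = pvH l := by
  induction l with
  | nil => rfl
  | cons x xs ih =>
    have hxs : xs.Pairwise (· ≤ ·) := (List.pairwise_cons.mp hs).2
    simp only [pvG, pvH, pvM_eq_pvD xs hxs]
    exact congrArg _ (ih hxs)

-- ===== VERDICT (by name: the statement is the Claim_ definition above) =====
theorem mapper2_spec : Claim_equal_mapper2 := by
  intro key value _
  show mapper2 key value = mapper2_alt key value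
  simp only [mapper2, mapper2_alt]
  have hsorted : (PySem.List.sorted value (fun s => s)).Pairwise (· ≤ ·) := by
    simpa using PySem.List.sorted_pairwise value (fun s => s)
  rw [pvA_eq_pvG, pvB_eq_pvH]
  exact pvG_eq_pvH _ hsorted
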